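-- pv_equiv track=rewrite | github.com/itsolutionscorp/AutoStyle-Clustering | assignments/python/hw4/submissions/untarred3/198.py | filter_subsets
-- ===== SOURCE A (Python) =====
-- def num_common_letters(goal_word, guess):
--     """Returns the number of letters in goal_word that are also in guess.
--     As per the rules of the game, goal_word cannot have any repeated
--     letters, but guess is allowed to have repeated letters.
--     goal_word and guess are assumed to be of the same length.
--     goal_word and guess are both instances of the word ADT.
--
--     >>> mwfs, mwfl = make_word_from_string, make_word_from_list
--     >>> num_common_letters(mwfs('steal'), mwfs('least'))
--     5
--     >>> num_common_letters(mwfs('steal'), mwfl(['s', 't', 'e', 'e', 'l']))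
--     4
--     >>> num_common_letters(mwfl(['s', 't', 'e', 'a', 'l']), mwfs('thief'))
--     2
--     >>> num_common_letters(mwfl(['c', 'a', 'r']), mwfl(['p', 'e', 't']))
--     0
--     """
--     "*** YOUR CODE HERE ***"
--     goal_length = len(goal_word)
--     guess_length = len(guess)
--     temp_goal = list(goal_word)
--     temp_guess = list(guess)
--     indexer_guess = 0
--     number_letters = 0
--     while indexer_guess < guess_length:
--         indexer_goal = 0
--         while indexer_goal < goal_length and temp_goal[indexer_goal] != temp_guess[indexer_guess]:
--             indexer_goal += 1
--         if indexer_goal == goal_length: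
--             indexer_guess += 1
--         else:
--             temp_goal.remove(temp_goal[indexer_goal])
--             temp_guess.remove(temp_guess[indexer_guess])
--             number_letters = number_letters + 1
--             goal_length -= 1
--             guess_length -= 1
--     return number_letters
--
-- def compatible(guess, score, letter_list):
--     """Returns True if it is possible for the word to get the score,
--     assuming that the true word only contains letters from
--     letter_list.
--     Precondition:  len(word) == len(letter_list)
--
--     >>> mwfs = make_word_from_string
--     >>> compatible(mwfs('steal'), 5, ['l', 'e', 'a', 's', 't'])
--     True
--     >>> compatible(mwfs('blanket'), 6, ['a', 'b', 'e', 'l', 'n', 'r', 't'])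
--     True
--     >>> compatible(mwfs('cool'), 4, ['c', 'o', 'l', 'd'])
--     False
--     >>> compatible(mwfs('found'), 1, ['d', 'e', 'f', 'g', 'h'])
--     False
--     """
--     "*** YOUR CODE HERE ***"
--     return num_common_letters(letter_list, guess) == score
--
-- def filter_subsets(word, score, possible_subsets):
--     """Returns the subsets for which word would get the given score.
--
--     >>> word = make_word_from_string('steal')
--     >>> sub1 = ['a', 'b', 'e', 'l', 's']
--     >>> sub2 = ['b', 'e', 'l', 't', 'z']
--     >>> sub3 = ['s', 't', 'e', 'a', 'l']
--     >>> sub4 = ['b', 'l', 'e', 's', 't']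
--     >>> filter_subsets(word, 4, [sub1, sub2, sub3, sub4])
--     [['a', 'b', 'e', 'l', 's'], ['b', 'l', 'e', 's', 't']]
--     """
--
--     "*** YOUR CODE HERE ***"
--     temp_list = list(possible_subsets)
--     subsets = len(temp_list)
--     filter_indexer = 0
--     while filter_indexer < subsets:
--         if compatible(word, score, temp_list[filter_indexer]):
--             filter_indexer += 1
--         else:
--             del temp_list[filter_indexer]
--             subsets -= 1
--     return temp_list
-- ===== SOURCE B (Python) =====
-- def filter_subsets(word, score, possible_subsets):
--     """Keep the subsets for which word would get the given score.
--
--     Counts common letters with a frequency table (multiset intersection,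
--     one pass over each word) instead of nested scan-and-remove loops."""
--     def num_common(subset):
--         remaining = {}
--         for s in subset:
--             remaining[s] = remaining.get(s, 0) + 1
--         matched = 0
--         for ch in word:
--             if remaining.get(ch, 0) > 0:
--                 remaining[ch] = remaining[ch] - 1
--                 matched += 1
--         return matched
--     return [subset for subset in possible_subsets if num_common(subset) == score]
-- ===== Notes on version B (the rewrite author's own statement) =====
-- stated objective: faster
-- what changed: num_common_letters's nested while-loops that scan temp_goal and remove from both lists are replaced by a frequency dictionary of the subset that is decremented in one pass over word (multiset intersection), and the outer index/del loop becomes a list comprehension keeping matching subsets.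
import Mathlib
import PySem

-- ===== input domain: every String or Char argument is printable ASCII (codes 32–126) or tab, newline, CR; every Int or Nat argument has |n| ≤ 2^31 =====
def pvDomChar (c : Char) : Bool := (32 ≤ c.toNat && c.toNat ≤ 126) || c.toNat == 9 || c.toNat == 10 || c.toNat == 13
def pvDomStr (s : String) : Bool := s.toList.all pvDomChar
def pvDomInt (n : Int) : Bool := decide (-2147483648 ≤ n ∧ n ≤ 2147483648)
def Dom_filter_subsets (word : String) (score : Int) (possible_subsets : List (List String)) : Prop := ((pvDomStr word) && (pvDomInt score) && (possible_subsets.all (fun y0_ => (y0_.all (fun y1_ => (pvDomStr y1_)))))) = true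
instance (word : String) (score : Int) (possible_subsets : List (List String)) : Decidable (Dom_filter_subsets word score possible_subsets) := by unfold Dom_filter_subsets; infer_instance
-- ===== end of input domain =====

-- B replaces the nested scan-and-remove loops by a frequency-dictionary pass (faster).

-- ===== PORT A =====
-- inner 'while indexer_goal < goal_length and temp_goal[indexer_goal] != temp_guess[indexer_guess]'
def pvInnerA (tg : List String) (c : String) (j : Nat) : Nat :=
  if h : j < tg.length ∧ tg[j]! ≠ c then pvInnerA tg c (j + 1) else j
termination_by tg.length - j
decreasing_by omega

-- outer 'while indexer_guess < guess_length' of num_common_letters; goal_length/guess_length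
-- are always the current list lengths (remove always removes a present element)
def pvLoopA (tg tgu : List String) (ig nl : Nat) : Nat :=
  if h : ig < tgu.length then
    let j := pvInnerA tg (tgu[ig]!) 0
    if j = tg.length then pvLoopA tg tgu (ig + 1) nl
    else pvLoopA (tg.erase tg[j]!) (tgu.erase tgu[ig]!) ig (nl + 1)
  else nl
termination_by tgu.length - ig
decreasing_by
  · omega
  · have hm : tgu[ig]! ∈ tgu := by
      rw [getElem!_pos tgu ig h]; exact List.getElem_mem h
    have := List.length_erase_of_mem hm
    omega

def pvNumCommonA (goal_word guess : List String) : Nat := pvLoopA goal_word guess 0 0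

-- compatible(guess, score, letter_list) = num_common_letters(letter_list, guess) == score
def pvCompatA (word : String) (score : Int) (letter_list : List String) : Bool :=
  ((pvNumCommonA letter_list (word.toList.map (fun c => String.ofList [c])) : Int) == score)

-- 'while filter_indexer < subsets' with del temp_list[filter_indexer]
def pvLoopF (word : String) (score : Int) (tl : List (List String)) (fi : Nat) : List (List String) :=
  if h : fi < tl.length then
    if pvCompatA word score tl[fi]! then pvLoopF word score tl (fi + 1)
    else pvLoopF word score (tl.eraseIdx fi) fi
  else tl
termination_by tl.length - fi
decreasing_by
  · omega
  · have := List.length_eraseIdx_of_lt h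
    omega

def filter_subsets (word : String) (score : Int) (possible_subsets : List (List String)) : List (List String) :=
  pvLoopF word score possible_subsets 0

-- ===== PORT B =====
-- for s in subset: remaining[s] = remaining.get(s, 0) + 1
def pvCounterB (subset : List String) : PySem.Dict String Int :=
  subset.foldl (fun d s => d.insert s (d.getD s 0 + 1)) PySem.Dict.empty

-- for ch in word: if remaining.get(ch,0) > 0: remaining[ch] -= 1; matched += 1
def pvNumCommonB (word : String) (subset : List String) : Int :=
  (word.toList.foldl
    (fun (p : Int × PySem.Dict String Int) c =>
      if p.2.getD (String.ofList [c]) 0 > 0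
      then (p.1 + 1, p.2.insert (String.ofList [c]) (p.2.getD (String.ofList [c]) 0 - 1)) else p)
    (0, pvCounterB subset)).1

def filter_subsets_alt (word : String) (score : Int) (possible_subsets : List (List String)) : List (List String) :=
  possible_subsets.filter (fun subset => pvNumCommonB word subset == score)

-- ===== PRECONDITION & SPEC =====
def Spec_filter_subsets (word : String) (score : Int) (possible_subsets : List (List String)) (out : List (List String)) : Prop := out = filter_subsets_alt word score possible_subsets
instance (word : String) (score : Int) (possible_subsets : List (List String)) (out : List (List String)) : Decidable (Spec_filter_subsets word score possible_subsets out) := by unfold Spec_filter_subsets; infer_instance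

-- ===== CLAIM (what is proved, stated in full; the proofs are below) =====
def Claim_equal_filter_subsets : Prop := ∀ (word : String) (score : Int) (possible_subsets : List (List String)), Dom_filter_subsets word score possible_subsets → Spec_filter_subsets word score possible_subsets (filter_subsets word score possible_subsets)

-- ===== LEMMAS AND PROOFS =====

-- reference multiset-intersection count: walk the guess, erasing matches from the goal
def pvG : List String → List String → Nat
  | _, [] => 0
  | tg, c :: r => if c ∈ tg then pvG (tg.erase c) r + 1 else pvG tg r

theorem pvInnerA_spec (tg : List String) (c : String) : ∀ (j : Nat), j ≤ tg.length →
    (pvInnerA tg c j = tg.length ∧ c ∉ tg.drop j) ∨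
    (pvInnerA tg c j < tg.length ∧ tg[pvInnerA tg c j]! = c) := by
  intro j
  induction j using pvInnerA.induct tg c with
  | case1 j h ih =>
    intro _
    rw [pvInnerA, dif_pos h]
    rcases ih h.1 with h1 | h1
    · left
      refine ⟨h1.1, ?_⟩
      rw [List.drop_eq_getElem_cons h.1]
      intro hmem
      rcases List.mem_cons.mp hmem with he | he
      · exact h.2 (by rw [getElem!_pos tg j h.1]; exact he.symm)
      · exact h1.2 he
    · right; exact h1
  | case2 j h =>
    intro hj
    rw [pvInnerA, dif_neg h]
    by_cases hlt : j < tg.length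
    · right
      refine ⟨hlt, ?_⟩
      by_contra hne
      exact h ⟨hlt, hne⟩
    · left
      have : j = tg.length := by omega
      subst this
      simp

theorem pvLoopA_eq : ∀ (tg tgu : List String) (ig nl : Nat),
    (∀ x ∈ tgu.take ig, x ∉ tg) →
    pvLoopA tg tgu ig nl = nl + pvG tg (tgu.drop ig) := by
  intro tg tgu ig nl
  induction tg, tgu, ig, nl using pvLoopA.induct with
  | case1 tg tgu ig nl h j hj ih =>
    -- inner scan exhausted: tgu[ig] not in tg
    intro hinv
    rw [pvLoopA, dif_pos h, if_pos hj]
    have hspec := pvInnerA_spec tg (tgu[ig]!) 0 (Nat.zero_le _)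
    have hnot : tgu[ig]! ∉ tg := by
      rcases hspec with hs | hs
      · simpa using hs.2
      · omega
    have hinv' : ∀ x ∈ tgu.take (ig + 1), x ∉ tg := by
      intro x hx
      rw [List.take_add_one, List.getElem?_eq_getElem h] at hx
      rcases List.mem_append.mp hx with hx | hx
      · exact hinv x hx
      · have : x = tgu[ig]! := by
          rw [getElem!_pos tgu ig h]; simpa using hx
        rw [this]; exact hnot
    rw [ih hinv']
    rw [List.drop_eq_getElem_cons h]
    have hget : tgu[ig] = tgu[ig]! := (getElem!_pos tgu ig h).symm
    rw [show (pvG tg (tgu[ig] :: tgu.drop (ig + 1))) = pvG tg (tgu.drop (ig + 1)) by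
      rw [pvG, if_neg (by rw [hget]; exact hnot)]]
  | case2 tg tgu ig nl h j hj ih =>
    -- match found at index j of tg
    intro hinv
    rw [pvLoopA, dif_pos h, if_neg hj]
    have hspec := pvInnerA_spec tg (tgu[ig]!) 0 (Nat.zero_le _)
    have hs : j < tg.length ∧ tg[j]! = tgu[ig]! := by
      rcases hspec with hs | hs
      · exact absurd hs.1 hj
      · exact hs
    have hcmem : tgu[ig]! ∈ tg := by
      rw [← hs.2, getElem!_pos tg j hs.1]; exact List.getElem_mem hs.1
    have hcpre : tgu[ig]! ∉ tgu.take ig := fun hx => hinv _ hx hcmem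
    have hlen : (tgu.take ig).length = ig := List.length_take_of_le (Nat.le_of_lt h)
    have herase : tgu.erase tgu[ig]! = tgu.take ig ++ (tgu.drop ig).erase tgu[ig]! := by
      have h2 := List.erase_append_right (l₁ := tgu.take ig) (tgu.drop ig) hcpre
      rwa [List.take_append_drop] at h2
    have hdropig : tgu.drop ig = tgu[ig]! :: tgu.drop (ig + 1) := by
      rw [List.drop_eq_getElem_cons h, getElem!_pos tgu ig h]
    have hinv' : ∀ x ∈ (tgu.erase tgu[ig]!).take ig, x ∉ tg.erase tg[j]! := by
      intro x hx hx2
      rw [herase, List.take_append_of_le_length (by omega), List.take_of_length_le (by omega)] at hx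
      exact hinv x hx (List.mem_of_mem_erase hx2)
    rw [ih hinv']
    have hdrop' : (tgu.erase tgu[ig]!).drop ig = tgu.drop (ig + 1) := by
      rw [herase, List.drop_append_of_le_length (by omega), List.drop_of_length_le (by omega),
        List.nil_append, hdropig, List.erase_cons_head]
    rw [hdrop', hdropig, hs.2]
    rw [show pvG tg (tgu[ig]! :: tgu.drop (ig + 1)) = pvG (tg.erase tgu[ig]!) (tgu.drop (ig + 1)) + 1 by
      rw [pvG, if_pos hcmem]]
    omega
  | case3 tg tgu ig nl h =>
    intro _
    rw [pvLoopA, dif_neg h]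
    rw [List.drop_of_length_le (by omega)]
    rfl

theorem pvNumCommonA_eq (goal guess : List String) : pvNumCommonA goal guess = pvG goal guess := by
  have := pvLoopA_eq goal guess 0 0 (by simp)
  simpa [pvNumCommonA] using this

theorem pvFoldB_eq (cs : List Char) : ∀ (tg : List String) (d : PySem.Dict String Int) (m : Int),
    (∀ k, d.getD k 0 = (tg.count k : Int)) →
    (cs.foldl
      (fun (p : Int × PySem.Dict String Int) c =>
        if p.2.getD (String.ofList [c]) 0 > 0
        then (p.1 + 1, p.2.insert (String.ofList [c]) (p.2.getD (String.ofList [c]) 0 - 1)) else p)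
      (m, d)).1 = m + (pvG tg (cs.map (fun c => String.ofList [c])) : Int) := by
  induction cs with
  | nil => intro tg d m hd; simp [pvG]
  | cons ch r ih =>
    intro tg d m hd
    rw [List.foldl_cons]
    by_cases hmem : String.ofList [ch] ∈ tg
    · have hcnt : 0 < tg.count (String.ofList [ch]) := List.count_pos_iff.mpr hmem
      have hpos : d.getD (String.ofList [ch]) 0 > 0 := by rw [hd _]; exact_mod_cast hcnt
      rw [if_pos hpos]
      have hd' : ∀ k, (d.insert (String.ofList [ch]) (d.getD (String.ofList [ch]) 0 - 1)).getD k 0 =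
          ((tg.erase (String.ofList [ch])).count k : Int) := by
        intro k
        rw [PySem.Dict.getD_insert]
        by_cases hk : k = String.ofList [ch]
        · subst hk
          rw [if_pos rfl, hd _, List.count_erase_self]
          omega
        · rw [if_neg hk, hd k, List.count_erase_of_ne hk]
      rw [ih (tg.erase (String.ofList [ch])) _ (m + 1) hd']
      rw [List.map_cons]
      rw [show pvG tg (String.ofList [ch] :: r.map (fun c => String.ofList [c])) =
          pvG (tg.erase (String.ofList [ch])) (r.map (fun c => String.ofList [c])) + 1 by
        rw [pvG, if_pos hmem]]
      push_cast
      ring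
    · have hz : tg.count (String.ofList [ch]) = 0 := List.count_eq_zero.mpr hmem
      have hnpos : ¬ d.getD (String.ofList [ch]) 0 > 0 := by rw [hd _, hz]; simp
      rw [if_neg hnpos, ih tg d m hd]
      rw [List.map_cons]
      rw [show pvG tg (String.ofList [ch] :: r.map (fun c => String.ofList [c])) =
          pvG tg (r.map (fun c => String.ofList [c])) by
        rw [pvG, if_neg hmem]]

theorem pvNumCommonB_eq (word : String) (subset : List String) :
    pvNumCommonB word subset = (pvG subset (word.toList.map (fun c => String.ofList [c])) : Int) := by
  unfold pvNumCommonB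
  rw [pvFoldB_eq word.toList subset _ 0 ?_]
  · simp
  · intro k
    unfold pvCounterB
    rw [PySem.Dict.foldl_insert_getD_add_one_eq_counter, PySem.Dict.getD_counter]

theorem pvLoopF_eq (word : String) (score : Int) : ∀ (tl : List (List String)) (fi : Nat),
    (∀ x ∈ tl.take fi, pvCompatA word score x = true) →
    pvLoopF word score tl fi = tl.take fi ++ (tl.drop fi).filter (pvCompatA word score) := by
  intro tl fi
  induction tl, fi using pvLoopF.induct word score with
  | case1 tl fi h hc ih =>
    intro hinv
    rw [pvLoopF, dif_pos h, if_pos hc]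
    have hget : tl[fi] = tl[fi]! := (getElem!_pos tl fi h).symm
    have hinv' : ∀ x ∈ tl.take (fi + 1), pvCompatA word score x = true := by
      intro x hx
      rw [List.take_add_one, List.getElem?_eq_getElem h] at hx
      rcases List.mem_append.mp hx with hx | hx
      · exact hinv x hx
      · have : x = tl[fi]! := by rw [← hget]; simpa using hx
        rw [this]; exact hc
    rw [ih hinv']
    rw [List.drop_eq_getElem_cons h, List.filter_cons, if_pos (by rw [hget]; exact hc)]
    rw [List.take_add_one, List.getElem?_eq_getElem h, Option.toList_some, List.append_assoc]
    rfl
  | case2 tl fi h hc ih =>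
    intro hinv
    rw [pvLoopF, dif_pos h, if_neg hc]
    have hget : tl[fi] = tl[fi]! := (getElem!_pos tl fi h).symm
    have hdecomp : tl.eraseIdx fi = tl.take fi ++ tl.drop (fi + 1) := List.eraseIdx_eq_take_drop_succ tl fi
    have hlen : (tl.take fi).length = fi := List.length_take_of_le (Nat.le_of_lt h)
    have hinv' : ∀ x ∈ (tl.eraseIdx fi).take fi, pvCompatA word score x = true := by
      intro x hx
      rw [hdecomp, List.take_append_of_le_length (by omega), List.take_of_length_le (by omega)] at hx
      exact hinv x hx
    rw [ih hinv']
    rw [hdecomp, List.take_append_of_le_length (by omega), List.take_of_length_le (by omega),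
      List.drop_append_of_le_length (by omega), List.drop_of_length_le (by omega), List.nil_append]
    rw [List.drop_eq_getElem_cons h, List.filter_cons,
      if_neg (show ¬ (pvCompatA word score tl[fi] = true) by rw [hget]; exact hc)]
  | case3 tl fi h =>
    intro _
    rw [pvLoopF, dif_neg h]
    rw [List.take_of_length_le (by omega), List.drop_of_length_le (by omega)]
    simp

-- ===== VERDICT (by name: the statement is the Claim_ definition above) =====
theorem filter_subsets_spec : Claim_equal_filter_subsets := by
  unfold Claim_equal_filter_subsets
  intro word score ps _
  unfold Spec_filter_subsets filter_subsets filter_subsets_alt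
  rw [pvLoopF_eq word score ps 0 (by simp)]
  simp only [List.take_zero, List.drop_zero, List.nil_append]
  apply List.filter_congr
  intro x _
  unfold pvCompatA
  rw [pvNumCommonA_eq, pvNumCommonB_eq]
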